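-- pv_equiv track=rewrite | github.com/EkimTeam/SandMatch | apps/tournaments/services/knockout.py | calculate_bye_positions
-- ===== SOURCE A (Python) =====
-- from typing import Dict, List, Optional, Tuple
--
-- def calculate_bye_positions(bracket_size: int, num_participants: int) -> List[int]:
--     """Рассчитать позиции BYE согласно правилам ITF.
--
--     Args:
--         bracket_size: размер сетки (степень двойки: 8, 16, 32...)
--         num_participants: количество реальных участников
--
--     Returns:
--         Список позиций (1-based) для размещения BYE
--     """
--     if num_participants >= bracket_size:
--         return []
--
--     num_byes = bracket_size - num_participants
--
--     # Стандартный порядок ITF для распределения BYE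
--     # Позиции распределяются равномерно по верхней и нижней половинам
--     itf_order = []
--
--     # Для сетки на 8: [1, 8, 4, 5, 2, 7, 3, 6]
--     # Для сетки на 16: [1, 16, 8, 9, 4, 13, 5, 12, 2, 15, 7, 10, 3, 14, 6, 11]
--     # Общий принцип: чередование верхней и нижней половин
--
--     def generate_itf_positions(size: int) -> List[int]:
--         """Генерация позиций в порядке ITF."""
--         if size == 2:
--             return [1, 2]
--
--         positions = []
--         half = size // 2
--
--         # Рекурсивно генерируем для половины
--         sub_positions = generate_itf_positions(half)
--
--         for pos in sub_positions:
--             positions.append(pos)  # Верхняя половина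
--             positions.append(size - pos + 1)  # Нижняя половина (зеркально)
--
--         return positions
--
--     itf_order = generate_itf_positions(bracket_size)
--
--     # Берём первые num_byes позиций из ITF порядка
--     opponent_positions = itf_order[:num_byes]
--
--     # Преобразовать позиции противников в реальные позиции BYE
--     # Если позиция нечетная → BYE на позиции +1
--     # Если позиция четная → BYE на позиции -1
--     bye_positions = []
--     for pos in opponent_positions:
--         if pos % 2 == 1:  # Нечетная
--             bye_positions.append(pos + 1)
--         else:  # Четная
--             bye_positions.append(pos - 1)
--
--     return sorted(bye_positions)
-- ===== SOURCE B (Python) =====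
-- def calculate_bye_positions(bracket_size: int, num_participants: int) -> list:
--     """B: compute each needed ITF position directly from its index via the
--     bit-recursion formula, never materialising the full bracket order."""
--     if num_participants >= bracket_size:
--         return []
--     num_byes = min(bracket_size - num_participants, bracket_size)
--     byes = []
--     for i in range(num_byes):
--         # descend: strip bits of i while halving the size down to 2
--         size = bracket_size
--         j = i
--         bits = []
--         while size > 2:
--             bits.append(j & 1)
--             j >>= 1
--             size //= 2
--         pos = j + 1
--         # ascend: re-apply bits most-significant-first, mirroring on odd bits
--         for b in reversed(bits):
--             size *= 2
--             if b:
--                 pos = size + 1 - pos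
--         byes.append(pos + 1 if pos % 2 == 1 else pos - 1)
--     return sorted(byes)
-- ===== Notes on version B (the rewrite author's own statement) =====
-- stated objective: alternative
-- what changed: B computes each of the first num_byes ITF positions directly from its index by a per-index bit descent/ascent instead of recursively materialising the full bracket-size ITF order list.
-- outside the precondition, e.g. on calculate_bye_positions(10, 6): A returns [2, 5, 6, 9], B returns [2, 3, 6, 7]
import Mathlib
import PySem

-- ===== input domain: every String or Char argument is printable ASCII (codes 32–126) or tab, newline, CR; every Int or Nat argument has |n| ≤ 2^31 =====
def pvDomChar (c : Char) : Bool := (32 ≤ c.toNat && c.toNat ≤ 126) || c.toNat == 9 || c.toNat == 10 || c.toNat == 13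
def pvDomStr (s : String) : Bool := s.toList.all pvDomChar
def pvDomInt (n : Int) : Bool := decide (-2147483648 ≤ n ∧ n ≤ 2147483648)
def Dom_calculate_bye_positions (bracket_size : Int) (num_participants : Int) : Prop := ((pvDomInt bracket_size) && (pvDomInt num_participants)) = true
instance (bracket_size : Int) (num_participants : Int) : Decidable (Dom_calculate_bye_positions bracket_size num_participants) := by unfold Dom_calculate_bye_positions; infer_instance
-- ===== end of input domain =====

-- B replaces A's full recursive construction of the whole ITF order by a direct
-- per-index bit computation of only the first num_byes positions (objective:
-- alternative algorithm; equal value on every power-of-two bracket size).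

-- ===== PORT A =====
-- generate_itf_positions: recursion on size; Python only terminates for size a power
-- of two ≥ 2 (Pre_ guarantees that); the '≤ 2' guard only makes the Lean function total.
def genItf (size : Nat) : List Int :=
  if size ≤ 2 then [1, 2]
  else
    (genItf (size / 2)).foldl (fun acc pos => acc ++ [pos, (size : Int) - pos + 1]) []
termination_by size
decreasing_by omega

def calculate_bye_positions (bracket_size : Int) (num_participants : Int) : List Int :=
  if num_participants ≥ bracket_size then []
  else
    let num_byes := bracket_size - num_participants
    -- natAbs is exact here: Pre_ gives bracket_size = 2^(k+1) > 0
    let itf_order := genItf bracket_size.natAbs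
    -- itf_order[:num_byes]; num_byes > 0 in this branch, so take is exact
    let opponent_positions := itf_order.take num_byes.toNat
    let bye_positions := opponent_positions.foldl
      (fun acc pos => if pos % 2 == 1 then acc ++ [pos + 1] else acc ++ [pos - 1]) []
    PySem.List.sorted bye_positions (fun x => x) false

-- ===== PORT B =====
-- the 'while size > 2' bit-collecting loop of Source B
def bitsLoop (size j : Nat) (bits : List Nat) : List Nat × Nat × Nat :=
  if size > 2 then bitsLoop (size / 2) (j / 2) (bits ++ [j % 2])
  else (bits, j, size)
termination_by size
decreasing_by omega

-- one step of the 'for b in reversed(bits)' loop of Source B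
def applyBits (st : Int × Nat) (b : Nat) : Int × Nat :=
  let size := st.2 * 2
  (if b == 0 then st.1 else (size : Int) + 1 - st.1, size)

def calculate_bye_positions_alt (bracket_size : Int) (num_participants : Int) : List Int :=
  if num_participants ≥ bracket_size then []
  else
    let num_byes := min (bracket_size - num_participants) bracket_size
    let byes := (List.range num_byes.toNat).foldl (fun acc i =>
      let r := bitsLoop bracket_size.natAbs i []
      let st := r.1.reverse.foldl applyBits ((r.2.1 : Int) + 1, r.2.2)
      acc ++ [if st.1 % 2 == 1 then st.1 + 1 else st.1 - 1]) []
    PySem.List.sorted byes (fun x => x) false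

-- ===== PRECONDITION & SPEC =====
-- Pre_ restricts to the docstring's stated domain (bracket_size a power of two ≥ 2), plus
-- the trivial num_participants >= bracket_size case: on other sizes A either raises
-- RecursionError or returns an accidental order produced by floor-halving a non-power size.
-- (bs = 2 ^ log2 bs is the standard closed-form power-of-two test)
def Pre_calculate_bye_positions (bracket_size : Int) (num_participants : Int) : Prop :=
  num_participants ≥ bracket_size ∨ (2 ≤ bracket_size ∧ bracket_size = 2 ^ bracket_size.natAbs.log2)
instance (bracket_size : Int) (num_participants : Int) : Decidable (Pre_calculate_bye_positions bracket_size num_participants) := by unfold Pre_calculate_bye_positions; infer_instance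

def pvWitness_calculate_bye_positions : Int × Int := (8, 5)

def Spec_calculate_bye_positions (bracket_size : Int) (num_participants : Int) (out : List Int) : Prop := out = calculate_bye_positions_alt bracket_size num_participants
instance (bracket_size : Int) (num_participants : Int) (out : List Int) : Decidable (Spec_calculate_bye_positions bracket_size num_participants out) := by unfold Spec_calculate_bye_positions; infer_instance

-- ===== CLAIM (what is proved, stated in full; the proofs are below) =====
def Claim_equal_calculate_bye_positions : Prop := ∀ (bracket_size : Int) (num_participants : Int), Dom_calculate_bye_positions bracket_size num_participants → Pre_calculate_bye_positions bracket_size num_participants → Spec_calculate_bye_positions bracket_size num_participants (calculate_bye_positions bracket_size num_participants)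

-- ===== LEMMAS AND PROOFS =====

-- proof-side closed form of the ITF position at index i in a bracket of size 2^(k+1)
def itfPos : Nat → Nat → Int
  | 0, i => (i : Int) + 1
  | k + 1, i => if i % 2 = 0 then itfPos k (i / 2) else (2 ^ (k + 2) : Int) + 1 - itfPos k (i / 2)

theorem interleave_range (n : Nat) (f g : Nat → Int) :
    (List.range n).flatMap (fun j => [f j, g j]) =
    (List.range (2 * n)).map (fun i => if i % 2 = 0 then f (i / 2) else g (i / 2)) := by
  induction n with
  | zero => simp
  | succ n ih =>
    have h2 : 2 * (n + 1) = 2 * n + 1 + 1 := by omega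
    rw [List.range_succ, h2, List.range_succ, List.range_succ]
    simp only [List.flatMap_append, List.map_append, ih]
    have e1 : (2 * n) % 2 = 0 := by omega
    have e2 : (2 * n + 1) % 2 ≠ 0 := by omega
    have e3 : (2 * n) / 2 = n := by omega
    have e4 : (2 * n + 1) / 2 = n := by omega
    simp [e1, e3, e4]

theorem genItf_eq (k : Nat) :
    genItf (2 ^ (k + 1)) = (List.range (2 ^ (k + 1))).map (itfPos k) := by
  induction k with
  | zero => simp [genItf, itfPos, List.range_succ]
  | succ k ih =>
    have hgt : ¬ (2 ^ (k + 2) ≤ 2) := by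
      have : 2 ^ (k + 2) ≥ 4 := by
        calc (4:Nat) = 2 ^ 2 := by norm_num
        _ ≤ 2 ^ (k + 2) := Nat.pow_le_pow_right (by norm_num) (by omega)
      omega
    have hhalf : 2 ^ (k + 2) / 2 = 2 ^ (k + 1) := by
      rw [pow_succ]; omega
    rw [genItf]
    simp only [hgt, if_false, hhalf, ih, PySem.List.foldl_append_eq_flatMap,
      List.nil_append, List.flatMap_map]
    have h2n : 2 ^ (k + 2) = 2 * 2 ^ (k + 1) := by ring
    have hr : (2 : Nat) ^ (k + 1 + 1) = 2 * 2 ^ (k + 1) := by ring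
    rw [hr, interleave_range (2 ^ (k + 1)) (fun j => itfPos k j)
      (fun j => ((2 * 2 ^ (k + 1) : Nat) : Int) - itfPos k j + 1)]
    apply List.map_congr_left
    intro i _
    rw [itfPos]
    have hc : ((2 * 2 ^ (k + 1) : Nat) : Int) = 2 ^ (k + 2) := by push_cast; ring
    rw [hc]
    split <;> ring

theorem bitsLoop_acc (size : Nat) : ∀ j bits, bitsLoop size j bits =
    (bits ++ (bitsLoop size j []).1, (bitsLoop size j []).2) := by
  induction size using Nat.strong_induction_on with
  | _ size ih =>
    intro j bits
    by_cases h : size > 2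
    · rw [bitsLoop, if_pos h, ih (size / 2) (by omega)]
      conv_rhs => rw [bitsLoop, if_pos h, ih (size / 2) (by omega)]
      simp
    · rw [bitsLoop, if_neg h]
      conv_rhs => rw [bitsLoop, if_neg h]
      simp

theorem posOf_eq (k : Nat) : ∀ i,
    (bitsLoop (2 ^ (k + 1)) i []).1.reverse.foldl applyBits
      (((bitsLoop (2 ^ (k + 1)) i []).2.1 : Int) + 1, (bitsLoop (2 ^ (k + 1)) i []).2.2)
    = (itfPos k i, 2 ^ (k + 1)) := by
  induction k with
  | zero =>
    intro i
    rw [bitsLoop]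
    simp [itfPos]
  | succ k ih =>
    intro i
    have hgt : 2 ^ (k + 2) > 2 := by
      have : 2 ^ (k + 2) ≥ 4 := by
        calc (4:Nat) = 2 ^ 2 := by norm_num
        _ ≤ 2 ^ (k + 2) := Nat.pow_le_pow_right (by norm_num) (by omega)
      omega
    have hhalf : 2 ^ (k + 2) / 2 = 2 ^ (k + 1) := by
      rw [pow_succ]; omega
    rw [bitsLoop, if_pos hgt, hhalf, List.nil_append, bitsLoop_acc]
    simp only [List.reverse_append, List.reverse_cons, List.reverse_nil, List.nil_append,
      List.foldl_append, List.foldl_cons, List.foldl_nil]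
    rw [ih (i / 2)]
    rw [itfPos]
    have h2n : ((2 ^ (k + 1) : Nat) * 2 : Nat) = (2 ^ (k + 2) : Nat) := by ring
    by_cases hp : i % 2 = 0
    · simp [applyBits, hp, h2n]
    · have : i % 2 = 1 := by omega
      simp [applyBits, this, h2n]

theorem foldl_trans (l : List Int) (acc : List Int) :
    l.foldl (fun acc pos => if pos % 2 == 1 then acc ++ [pos + 1] else acc ++ [pos - 1]) acc
    = acc ++ l.map (fun pos => if pos % 2 == 1 then pos + 1 else pos - 1) := by
  induction l generalizing acc with
  | nil => simp
  | cons x xs ih =>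
    simp only [List.foldl_cons, List.map_cons]
    rw [ih]
    split <;> simp

-- ===== VERDICT (by name: the statement is the Claim_ definition above) =====
theorem calculate_bye_positions_spec : Claim_equal_calculate_bye_positions := by
  intro bs np _ hpre
  unfold Spec_calculate_bye_positions calculate_bye_positions calculate_bye_positions_alt
  by_cases hge : np ≥ bs
  · simp [hge]
  · rcases hpre with h | ⟨hbs2, hpow⟩
    · exact absurd h hge
    obtain ⟨k, hbs⟩ : ∃ k, bs = 2 ^ (k + 1) := by
      match hL : bs.natAbs.log2, hpow with
      | 0, hpow => norm_num at hpow; omega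
      | m + 1, hpow => exact ⟨m, hpow⟩
    simp only [hge, if_false]
    have hpos : (0 : Int) < 2 ^ (k + 1) := by positivity
    have hnat : bs.natAbs = 2 ^ (k + 1) := by
      subst hbs
      rw [Int.natAbs_pow]
      rfl
    rw [hnat, genItf_eq, foldl_trans, List.nil_append, ← List.map_take, List.take_range]
    have hnb : (min (bs - np) bs).toNat = min (bs - np).toNat (2 ^ (k + 1)) := by
      subst hbs
      have hN : ((2 : Int) ^ (k + 1)).toNat = 2 ^ (k + 1) := by
        have : ((2 : Int)) ^ (k + 1) = ((2 ^ (k + 1) : Nat) : Int) := by push_cast; ring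
        rw [this, Int.toNat_natCast]
      omega
    rw [hnb]
    congr 1
    have hmap : ∀ m : Nat, (List.range m).foldl (fun acc i =>
        let r := bitsLoop (2 ^ (k + 1)) i []
        let st := r.1.reverse.foldl applyBits ((r.2.1 : Int) + 1, r.2.2)
        acc ++ [if st.1 % 2 == 1 then st.1 + 1 else st.1 - 1]) []
        = (List.range m).map (fun i =>
            if itfPos k i % 2 == 1 then itfPos k i + 1 else itfPos k i - 1) := by
      intro m
      rw [PySem.List.foldl_append_singleton_eq_map, List.nil_append]
      apply List.map_congr_left
      intro i _
      simp only [posOf_eq k i]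
    rw [hmap, List.map_map]
    rfl
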